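-- pv_equiv track=rewrite | github.com/NorikatsuKoide/kemuo-samples | gdd2011_quiz_slidepanel/src/panel_engine.py | __getHighScore
-- ===== SOURCE A (Python) =====
-- def __getHighScore(scores):
--
-- 	highIndex = -1
-- 	highScore = -1
-- 	for i in range(len(scores)):
-- 		if scores[i] >= 0 and (highScore < 0 or highScore > scores[i]):
-- 			highScore = scores[i]
-- 			highIndex = i
--
-- 	return (highIndex, highScore)
-- ===== SOURCE B (Python) =====
-- def __getHighScore(scores):
--     for s, i in sorted((s, i) for i, s in enumerate(scores)):
--         if s >= 0:
--             return (i, s)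
--     return (-1, -1)
-- ===== Notes on version B (the rewrite author's own statement) =====
-- stated objective: alternative
-- what changed: Replaces A's single accumulator scan by sort-then-scan: build (score, index) pairs, sort them lexicographically, and return the first pair with a non-negative score (the lex order makes the first hit the minimum non-negative score with the smallest index).
import Mathlib
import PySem

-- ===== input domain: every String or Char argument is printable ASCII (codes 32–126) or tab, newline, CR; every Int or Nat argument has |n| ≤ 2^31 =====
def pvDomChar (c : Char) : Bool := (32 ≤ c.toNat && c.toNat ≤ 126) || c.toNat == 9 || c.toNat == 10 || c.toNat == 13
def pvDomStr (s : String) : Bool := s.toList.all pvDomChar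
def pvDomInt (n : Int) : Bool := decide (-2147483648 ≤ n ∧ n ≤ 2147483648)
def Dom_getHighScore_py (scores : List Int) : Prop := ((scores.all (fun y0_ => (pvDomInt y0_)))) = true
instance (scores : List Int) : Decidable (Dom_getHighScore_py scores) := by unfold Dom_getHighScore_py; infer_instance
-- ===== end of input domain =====

-- B replaces A's single accumulator scan by sort-then-scan over (score, index) pairs; objective: alternative (not faster).

-- ===== PORT A =====
-- for i in range(len(scores)): if scores[i] >= 0 and (highScore < 0 or highScore > scores[i]): update
def getHighScore_py (scores : List Int) : Int × Int :=
  (PySem.List.pyRange 0 scores.length 1).foldl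
    (fun st i =>
      if PySem.List.pyGetD scores i 0 ≥ 0 ∧ (st.2 < 0 ∨ st.2 > PySem.List.pyGetD scores i 0)
      then (i, PySem.List.pyGetD scores i 0) else st)
    (-1, -1)

-- ===== PORT B =====
-- for s, i in sorted((s, i) for i, s in enumerate(scores)): if s >= 0: return (i, s) / return (-1, -1)
def getHighScore_py_alt (scores : List Int) : Int × Int :=
  let pairs := (PySem.List.enumerate scores 0).map (fun p => (p.2, p.1))
  match (PySem.List.sorted2 pairs (fun t => t.1) (fun t => t.2)).find?
      (fun t => decide (t.1 ≥ 0)) with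
  | some m => (m.2, m.1)
  | none => (-1, -1)

-- ===== PRECONDITION & SPEC =====
def Spec_getHighScore_py (scores : List Int) (out : Int × Int) : Prop := out = getHighScore_py_alt scores
instance (scores : List Int) (out : Int × Int) : Decidable (Spec_getHighScore_py scores out) := by unfold Spec_getHighScore_py; infer_instance

-- ===== CLAIM (what is proved, stated in full; the proofs are below) =====
def Claim_equal_getHighScore_py : Prop := ∀ (scores : List Int), Dom_getHighScore_py scores → Spec_getHighScore_py scores (getHighScore_py scores)

-- ===== LEMMAS AND PROOFS =====

-- the (score, index) pair list both sides are about
def pvPairs (scores : List Int) : List (Int × Int) :=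
  (PySem.List.enumerate scores 0).map (fun p => (p.2, p.1))

-- Python's lexicographic ≤ on (score, index) tuples
def pvLe (a b : Int × Int) : Prop := a.1 < b.1 ∨ (a.1 = b.1 ∧ a.2 ≤ b.2)

-- the strict comparison sorted2 uses for these keys
def pvBefore (a b : Int × Int) : Bool :=
  decide (a.1 < b.1) || !decide (b.1 < a.1) && decide (a.2 < b.2)

theorem pvLe_trans {a b c : Int × Int} (h1 : pvLe a b) (h2 : pvLe b c) : pvLe a c := by
  unfold pvLe at *; omega

theorem pvLe_antisymm {a b : Int × Int} (h1 : pvLe a b) (h2 : pvLe b a) : a = b := by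
  unfold pvLe at *
  obtain ⟨a1, a2⟩ := a; obtain ⟨b1, b2⟩ := b
  simp at h1 h2 ⊢; omega

theorem pvBefore_true {a b : Int × Int} (h : pvBefore a b = true) : pvLe a b := by
  unfold pvBefore at h; unfold pvLe; simp at h; omega

theorem pvBefore_false {a b : Int × Int} (h : pvBefore a b = false) : pvLe b a := by
  unfold pvBefore at h; unfold pvLe; simp at h; omega

theorem pvInsertBy_pairwise (x : Int × Int) (ys : List (Int × Int))
    (h : ys.Pairwise pvLe) : (PySem.List.insertBy pvBefore x ys).Pairwise pvLe := by
  induction ys with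
  | nil => simp [PySem.List.insertBy]
  | cons y t ih =>
      rw [List.pairwise_cons] at h
      obtain ⟨hy, ht⟩ := h
      unfold PySem.List.insertBy
      by_cases hb : pvBefore x y = true
      · simp only [hb, if_pos]
        refine List.pairwise_cons.2 ⟨?_, List.pairwise_cons.2 ⟨hy, ht⟩⟩
        intro z hz
        rcases List.mem_cons.1 hz with rfl | hz
        · exact pvBefore_true hb
        · exact pvLe_trans (pvBefore_true hb) (hy z hz)
      · rw [Bool.not_eq_true] at hb
        simp only [hb]
        refine List.pairwise_cons.2 ⟨?_, ih ht⟩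
        intro z hz
        rcases (PySem.List.mem_insertBy _ _ _ _).1 hz with rfl | hz
        · exact pvBefore_false hb
        · exact hy z hz

theorem pvFoldl_pairwise (xs acc : List (Int × Int)) (h : acc.Pairwise pvLe) :
    (xs.foldl (fun acc x => PySem.List.insertBy pvBefore x acc) acc).Pairwise pvLe := by
  induction xs generalizing acc with
  | nil => exact h
  | cons x t ih => exact ih _ (pvInsertBy_pairwise x acc h)

theorem pvSorted2_eq (xs : List (Int × Int)) :
    PySem.List.sorted2 xs (fun t => t.1) (fun t => t.2) =
      xs.foldl (fun acc x => PySem.List.insertBy pvBefore x acc) [] := rfl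

theorem pvSorted2_pairwise (xs : List (Int × Int)) :
    (PySem.List.sorted2 xs (fun t => t.1) (fun t => t.2)).Pairwise pvLe := by
  rw [pvSorted2_eq]
  exact pvFoldl_pairwise xs [] (List.Pairwise.nil)

-- find? on a pvLe-sorted list returns a pvLe-minimum among the elements satisfying the test
theorem pvFind_some (ys : List (Int × Int)) (h : ys.Pairwise pvLe) (m : Int × Int)
    (hf : ys.find? (fun t => decide (t.1 ≥ 0)) = some m) :
    m ∈ ys ∧ m.1 ≥ 0 ∧ ∀ q ∈ ys, q.1 ≥ 0 → pvLe m q := by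
  induction ys with
  | nil => simp at hf
  | cons y t ih =>
      rw [List.pairwise_cons] at h
      obtain ⟨hy, ht⟩ := h
      rw [List.find?_cons] at hf
      by_cases hp : (y.1 ≥ 0)
      · simp only [hp, decide_true] at hf
        obtain rfl := Option.some.inj hf
        refine ⟨List.mem_cons_self, hp, ?_⟩
        intro q hq _
        rcases List.mem_cons.1 hq with rfl | hq
        · exact Or.inr ⟨rfl, le_refl _⟩
        · exact hy q hq
      · simp only [hp, decide_false] at hf
        obtain ⟨hm, hm0, hmin⟩ := ih ht hf
        refine ⟨List.mem_cons_of_mem _ hm, hm0, ?_⟩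
        intro q hq hq0
        rcases List.mem_cons.1 hq with rfl | hq
        · exact absurd hq0 hp
        · exact hmin q hq hq0

theorem pvPairs_snoc (xs : List Int) (x : Int) :
    pvPairs (xs ++ [x]) = pvPairs xs ++ [(x, (xs.length : Int))] := by
  unfold pvPairs
  rw [PySem.List.enumerate_append]
  simp [PySem.List.enumerate_cons, PySem.List.enumerate_nil]

theorem pvA_snoc (xs : List Int) (x : Int) :
    getHighScore_py (xs ++ [x]) =
      (if x ≥ 0 ∧ ((getHighScore_py xs).2 < 0 ∨ (getHighScore_py xs).2 > x)
       then ((xs.length : Int), x) else getHighScore_py xs) := by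
  unfold getHighScore_py
  have hlen : (((xs ++ [x]).length : Nat) : Int) = (xs.length : Int) + 1 := by
    simp
  rw [hlen, PySem.List.pyRange_one_succ_right (by positivity), List.foldl_append]
  have hget : PySem.List.pyGetD (xs ++ [x]) (xs.length : Int) 0 = x := by
    rw [PySem.List.pyGetD_natCast]
    simp
  have hcongr :
      (PySem.List.pyRange 0 (xs.length : Int) 1).foldl
        (fun st i =>
          if PySem.List.pyGetD (xs ++ [x]) i 0 ≥ 0 ∧ (st.2 < 0 ∨ st.2 > PySem.List.pyGetD (xs ++ [x]) i 0)
          then (i, PySem.List.pyGetD (xs ++ [x]) i 0) else st) ((-1 : Int), (-1 : Int)) =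
      (PySem.List.pyRange 0 (xs.length : Int) 1).foldl
        (fun st i =>
          if PySem.List.pyGetD xs i 0 ≥ 0 ∧ (st.2 < 0 ∨ st.2 > PySem.List.pyGetD xs i 0)
          then (i, PySem.List.pyGetD xs i 0) else st) ((-1 : Int), (-1 : Int)) := by
    apply PySem.List.foldl_congr_mem
    intro acc i hi
    have hmem := (PySem.List.mem_pyRange_one).1 hi
    have h0 : 0 ≤ i := hmem.1
    have h1 : i < (xs.length : Int) := hmem.2
    have he : PySem.List.pyGetD (xs ++ [x]) i 0 = PySem.List.pyGetD xs i 0 := by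
      rw [PySem.List.pyGetD_eq_getElem (xs ++ [x]) 0 h0 (by simp; omega),
          PySem.List.pyGetD_eq_getElem xs 0 h0 (by omega)]
      exact List.getElem_append_left (by omega)
    rw [he]
  simp only [List.foldl_cons, List.foldl_nil, hget, hcongr]

-- A's result characterised: either no non-negative score, or a pvLe-minimal (score, index) pair
theorem pvMainA (xs : List Int) :
    (getHighScore_py xs = (-1, -1) ∧ ∀ p ∈ pvPairs xs, ¬ (p.1 ≥ 0)) ∨
    (∃ s i, getHighScore_py xs = (i, s) ∧ (s, i) ∈ pvPairs xs ∧ s ≥ 0 ∧ i < (xs.length : Int) ∧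
      ∀ p ∈ pvPairs xs, p.1 ≥ 0 → pvLe (s, i) p) := by
  induction xs using List.reverseRecOn with
  | nil =>
      left
      exact ⟨rfl, by simp [pvPairs, PySem.List.enumerate_nil]⟩
  | append_singleton xs x ih =>
      rw [pvA_snoc, pvPairs_snoc]
      rcases ih with ⟨hA, hN⟩ | ⟨s, i, hA, hMem, hs, hiLt, hMin⟩
      · by_cases hx : x ≥ 0
        · right
          refine ⟨x, (xs.length : Int), ?_, List.mem_append_right _ (by simp), hx, by simp, ?_⟩
          · rw [hA]; simp [hx]
          · intro p hp hp0
            rcases List.mem_append.1 hp with hp | hp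
            · exact absurd hp0 (hN p hp)
            · simp at hp; subst hp; exact Or.inr ⟨rfl, le_refl _⟩
        · left
          constructor
          · rw [hA]; simp at hx ⊢; omega
          · intro p hp
            rcases List.mem_append.1 hp with hp | hp
            · exact hN p hp
            · simp at hp; subst hp; simpa using hx
      · by_cases hx : x ≥ 0
        · by_cases hlt : x < s
          · right
            refine ⟨x, (xs.length : Int), ?_, List.mem_append_right _ (by simp), hx, by simp, ?_⟩
            · rw [hA]; simp only
              rw [if_pos ⟨hx, Or.inr hlt⟩]
            · intro p hp hp0
              rcases List.mem_append.1 hp with hp | hp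
              · exact pvLe_trans (Or.inl hlt) (hMin p hp hp0)
              · simp at hp; subst hp; exact Or.inr ⟨rfl, le_refl _⟩
          · right
            refine ⟨s, i, ?_, List.mem_append_left _ hMem, hs, by simp; omega, ?_⟩
            · rw [hA]; simp only
              rw [if_neg]
              intro ⟨_, h2⟩; omega
            · intro p hp hp0
              rcases List.mem_append.1 hp with hp | hp
              · exact hMin p hp hp0
              · simp at hp; subst hp
                unfold pvLe; simp; omega
        · right
          refine ⟨s, i, ?_, List.mem_append_left _ hMem, hs, by simp; omega, ?_⟩
          · rw [hA]; simp only
            rw [if_neg]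
            intro ⟨h1, _⟩; exact hx h1
          · intro p hp hp0
            rcases List.mem_append.1 hp with hp | hp
            · exact hMin p hp hp0
            · simp at hp; subst hp; exact absurd hp0 hx

theorem pvAltEq (scores : List Int) :
    getHighScore_py_alt scores =
      match (PySem.List.sorted2 (pvPairs scores) (fun t => t.1) (fun t => t.2)).find?
          (fun t => decide (t.1 ≥ 0)) with
      | some m => (m.2, m.1)
      | none => (-1, -1) := rfl

-- ===== VERDICT (by name: the statement is the Claim_ definition above) =====
theorem getHighScore_py_spec : Claim_equal_getHighScore_py := by
  intro scores _
  unfold Spec_getHighScore_py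
  rw [pvAltEq]
  have hperm := PySem.List.sorted2_perm (pvPairs scores) (fun t => t.1) (fun t => t.2) false
  have hpw := pvSorted2_pairwise (pvPairs scores)
  cases hfind : (PySem.List.sorted2 (pvPairs scores) (fun t => t.1) (fun t => t.2)).find?
      (fun t => decide (t.1 ≥ 0)) with
  | none =>
      have hnone := List.find?_eq_none.1 hfind
      rcases pvMainA scores with ⟨hA, _⟩ | ⟨s, i, _, hMem, hs, _, _⟩
      · simpa using hA
      · exfalso
        have : (s, i) ∈ PySem.List.sorted2 (pvPairs scores) (fun t => t.1) (fun t => t.2) :=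
          (hperm.mem_iff).2 hMem
        have := hnone _ this
        simp at this
        omega
  | some m =>
      obtain ⟨hmMem, hm0, hmMin⟩ := pvFind_some _ hpw m hfind
      have hmPairs : m ∈ pvPairs scores := (hperm.mem_iff).1 hmMem
      rcases pvMainA scores with ⟨_, hN⟩ | ⟨s, i, hA, hMem, hs, _, hMin⟩
      · exact absurd hm0 (hN m hmPairs)
      · have h1 : pvLe (s, i) m := hMin m hmPairs hm0
        have h2 : pvLe m (s, i) := hmMin (s, i) ((hperm.mem_iff).2 hMem) hs
        have : m = (s, i) := pvLe_antisymm h2 h1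
        subst this
        simpa using hA
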